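-- pv_equiv track=rewrite | github.com/pat031-prog/helix-inference-os-v.01 | helix_kv/transformers_cache.py | _default_protected_layer_indices
-- ===== SOURCE A (Python) =====
-- _DEFAULT_PROTECTED_LAYER_COUNT = 2
--
-- def _default_protected_layer_indices(num_layers: int) -> list[int]:
--     protected: set[int] = set()
--     if num_layers <= 0:
--         return []
--     for offset in range(min(_DEFAULT_PROTECTED_LAYER_COUNT, num_layers)):
--         protected.add(offset)
--         protected.add(max(num_layers - 1 - offset, 0))
--     return sorted(protected)
-- ===== SOURCE B (Python) =====
-- _DEFAULT_PROTECTED_LAYER_COUNT = 2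
--
-- def _default_protected_layer_indices(num_layers: int) -> list[int]:
--     # Closed form: first-k and last-k ranges overlap exactly when num_layers < 2*k,
--     # in which case every layer is protected.
--     if num_layers <= 0:
--         return []
--     if num_layers <= 2 * _DEFAULT_PROTECTED_LAYER_COUNT:
--         return list(range(num_layers))
--     return [0, 1, num_layers - 2, num_layers - 1]
-- ===== Notes on version B (the rewrite author's own statement) =====
-- stated objective: simpler
-- what changed: Replaced the loop that accumulates indices in a set and sorts them with a direct closed form: [] for non-positive counts, all indices when the first-2 and last-2 ranges overlap (num_layers <= 2*_DEFAULT_PROTECTED_LAYER_COUNT), else [0, 1, num_layers-2, num_layers-1].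
import Mathlib
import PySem

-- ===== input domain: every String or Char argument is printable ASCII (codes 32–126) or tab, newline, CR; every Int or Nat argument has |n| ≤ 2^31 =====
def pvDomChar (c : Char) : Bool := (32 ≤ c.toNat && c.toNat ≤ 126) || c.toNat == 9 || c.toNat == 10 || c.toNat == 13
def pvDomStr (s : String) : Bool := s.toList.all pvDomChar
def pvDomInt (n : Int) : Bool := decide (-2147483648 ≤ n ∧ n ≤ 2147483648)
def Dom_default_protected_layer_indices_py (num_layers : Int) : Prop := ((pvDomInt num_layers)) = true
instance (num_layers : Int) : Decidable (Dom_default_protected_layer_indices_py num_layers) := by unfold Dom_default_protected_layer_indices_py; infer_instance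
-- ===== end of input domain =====

-- B replaces A's set-accumulation loop + sort with a direct closed-form case split (simpler, same cost).


-- ===== PORT A =====
def default_protected_layer_indices_py (num_layers : Int) : List Int :=
  let prot : PySem.Set Int := []
  if num_layers ≤ 0 then []
  else
    let prot := (PySem.List.pyRange 0 (min 2 num_layers) 1).foldl
      (fun s offset => PySem.Set.add (PySem.Set.add s offset) (max (num_layers - 1 - offset) 0)) prot
    PySem.List.sorted prot (fun x => x) false

-- ===== PORT B =====
def default_protected_layer_indices_py_alt (num_layers : Int) : List Int :=
  if num_layers ≤ 0 then []
  else if num_layers ≤ 2 * 2 then (PySem.List.pyRange 0 num_layers 1)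
  else [0, 1, num_layers - 2, num_layers - 1]

-- ===== PRECONDITION & SPEC =====
def Spec_default_protected_layer_indices_py (num_layers : Int) (out : List Int) : Prop := out = default_protected_layer_indices_py_alt num_layers
instance (num_layers : Int) (out : List Int) : Decidable (Spec_default_protected_layer_indices_py num_layers out) := by unfold Spec_default_protected_layer_indices_py; infer_instance

-- ===== CLAIM (what is proved, stated in full; the proofs are below) =====
def Claim_equal_default_protected_layer_indices_py : Prop := ∀ (num_layers : Int), Dom_default_protected_layer_indices_py num_layers → Spec_default_protected_layer_indices_py num_layers (default_protected_layer_indices_py num_layers)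

-- ===== LEMMAS AND PROOFS =====

-- For num_layers ≥ 5 the loop visits offsets 0 and 1 and the sorted set is [0, 1, n-2, n-1].
theorem pv_big (n : Int) (h : 5 ≤ n) :
    default_protected_layer_indices_py n = [0, 1, n - 2, n - 1] := by
  have h0 : ¬ n ≤ 0 := by omega
  have hmin : min 2 n = 2 := by omega
  simp only [default_protected_layer_indices_py, if_neg h0, hmin]
  have hr : PySem.List.pyRange 0 2 1 = [0, 1] := by decide
  rw [hr]
  simp only [List.foldl]
  have e1 : PySem.Set.add ([] : PySem.Set Int) 0 = [0] := by decide
  rw [e1]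
  have e2 : PySem.Set.add ([0] : PySem.Set Int) (max (n - 1 - 0) 0) = [0, n - 1] := by
    have hm : max (n - 1 - 0) 0 = n - 1 := by omega
    rw [hm]; simp [PySem.Set.add]; omega
  rw [e2]
  have e3 : PySem.Set.add ([0, n - 1] : PySem.Set Int) 1 = [0, n - 1, 1] := by
    simp [PySem.Set.add, PySem.Set.contains]
    omega
  rw [e3]
  have e4 : PySem.Set.add ([0, n - 1, 1] : PySem.Set Int) (max (n - 1 - 1) 0) = [0, n - 1, 1, n - 2] := by
    have hm : max (n - 1 - 1) 0 = n - 2 := by omega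
    rw [hm]; simp [PySem.Set.add]; omega
  rw [e4]
  apply PySem.List.sorted_eq_of_perm_of_pairwise_lt
  · exact List.Perm.cons 0 (List.perm_append_comm (l₁ := [1, n - 2]) (l₂ := [n - 1]))
  · simp [List.pairwise_cons]
    omega

-- ===== VERDICT (by name: the statement is the Claim_ definition above) =====
theorem default_protected_layer_indices_py_spec : Claim_equal_default_protected_layer_indices_py := by
  intro n _
  unfold Spec_default_protected_layer_indices_py
  by_cases h5 : 5 ≤ n
  · rw [pv_big n h5]
    have h0 : ¬ n ≤ 0 := by omega
    have h4 : ¬ n ≤ 2 * 2 := by omega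
    simp only [default_protected_layer_indices_py_alt, if_neg h0, if_neg h4]
  · by_cases h0 : n ≤ 0
    · simp [default_protected_layer_indices_py, default_protected_layer_indices_py_alt, h0]
    · have h1 : 1 ≤ n := by omega
      have h4 : n ≤ 4 := by omega
      interval_cases n <;> decide
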